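-- pv_equiv track=rewrite | github.com/ycbaek/BillboardNextRank | src/2_Scraping_Billboard.py | get_song_artist
-- ===== SOURCE A (Python) =====
-- def get_song_artist(song_raw_data):
--
--     '''
--     Input : song name, space, space,.. ,space , artist name
--     Output : song name, artist name
--
--     '''
--     song_name = []
--     artist_name = []
--     space_num = 0
--     for item in song_raw_data.split(" "):
--         if len(item) == 0:
--             space_num +=1
--         if space_num == 0:
--             song_name.append(item)
--         else:
--             if len(item) !=0:
--                 artist_name.append(item)
--     return " ".join(song_name), " ".join(artist_name)
-- ===== SOURCE B (Python) =====
-- def get_song_artist(song_raw_data):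
--     tokens = song_raw_data.split(" ")
--     if "" in tokens:
--         i = tokens.index("")
--         return " ".join(tokens[:i]), " ".join(t for t in tokens[i:] if t)
--     return " ".join(tokens), ""
-- ===== Notes on version B (the rewrite author's own statement) =====
-- stated objective: alternative
-- what changed: B locates the first empty token with list.index and partitions the token list by slicing at that boundary, instead of A's single streaming pass with a space_num state flag deciding per item where it goes.
import Mathlib
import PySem

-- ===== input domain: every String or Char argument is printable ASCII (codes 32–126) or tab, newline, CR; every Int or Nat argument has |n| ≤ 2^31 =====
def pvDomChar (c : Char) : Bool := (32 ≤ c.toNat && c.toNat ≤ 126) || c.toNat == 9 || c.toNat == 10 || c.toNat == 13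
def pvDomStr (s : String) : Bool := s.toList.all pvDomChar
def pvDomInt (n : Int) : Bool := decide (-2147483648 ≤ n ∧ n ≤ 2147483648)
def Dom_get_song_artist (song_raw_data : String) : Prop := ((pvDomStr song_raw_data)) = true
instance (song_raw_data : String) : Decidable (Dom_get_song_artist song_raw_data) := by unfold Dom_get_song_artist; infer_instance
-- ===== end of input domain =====

-- B partitions the token list at the first empty token found with index(""), instead of A's streaming pass with a space_num flag; same cost, different decomposition.

-- ===== PORT A =====
-- one step of A's for-loop: state = (song_name, artist_name, space_num)
def pvStepA (st : List String × List String × Int) (item : String) : List String × List String × Int :=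
  let n := if PySem.Str.len item == 0 then st.2.2 + 1 else st.2.2
  if n == 0 then (st.1 ++ [item], st.2.1, n)
  else if PySem.Str.len item != 0 then (st.1, st.2.1 ++ [item], n)
  else (st.1, st.2.1, n)

def get_song_artist (song_raw_data : String) : String × String :=
  -- split(" "): sep is the nonempty literal " ", so split? is always `some`
  let tokens := (PySem.Str.split? song_raw_data " ").getD []
  let st := tokens.foldl pvStepA ([], [], 0)
  (PySem.Str.join " " st.1, PySem.Str.join " " st.2.1)

-- ===== PORT B =====
def get_song_artist_alt (song_raw_data : String) : String × String :=
  let tokens := (PySem.Str.split? song_raw_data " ").getD []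
  match PySem.List.index? tokens "" with
  | some i =>
      (PySem.Str.join " " (PySem.List.slice tokens none (some (i : Int))),
       PySem.Str.join " " ((PySem.List.slice tokens (some (i : Int)) none).filter
         (fun t => PySem.Str.len t != 0)))
  | none => (PySem.Str.join " " tokens, "")

-- ===== PRECONDITION & SPEC =====
def Spec_get_song_artist (song_raw_data : String) (out : String × String) : Prop := out = get_song_artist_alt song_raw_data
instance (song_raw_data : String) (out : String × String) : Decidable (Spec_get_song_artist song_raw_data out) := by unfold Spec_get_song_artist; infer_instance

-- ===== CLAIM (what is proved, stated in full; the proofs are below) =====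
def Claim_equal_get_song_artist : Prop := ∀ (song_raw_data : String), Dom_get_song_artist song_raw_data → Spec_get_song_artist song_raw_data (get_song_artist song_raw_data)

-- ===== LEMMAS AND PROOFS =====

-- while space_num = 0 and no empty token is seen, every item goes to song_name
theorem pvFoldA_zero (L : List String) (s a : List String) (h : "" ∉ L) :
    L.foldl pvStepA (s, a, 0) = (s ++ L, a, 0) := by
  induction L generalizing s with
  | nil => simp
  | cons x xs ih =>
      have hx : x ≠ "" := by intro hx; exact h (by simp [hx])
      have hstep : pvStepA (s, a, 0) x = (s ++ [x], a, 0) := by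
        simp [pvStepA, hx]
      rw [List.foldl_cons, hstep, ih (s ++ [x]) (fun hm => h (List.mem_cons_of_mem _ hm))]
      simp

-- once space_num ≥ 1, every nonempty item goes to artist_name
theorem pvFoldA_pos (L : List String) (s a : List String) (n : Int) (hn : 1 ≤ n) :
    ∃ m : Int, 1 ≤ m ∧
      L.foldl pvStepA (s, a, n) = (s, a ++ L.filter (fun t => PySem.Str.len t != 0), m) := by
  induction L generalizing a n with
  | nil => exact ⟨n, hn, by simp⟩
  | cons x xs ih =>
      by_cases hx : x = ""
      · have hstep : pvStepA (s, a, n) x = (s, a, n + 1) := by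
          simp [pvStepA, hx, (show (n : Int) + 1 ≠ 0 by omega)]
        obtain ⟨m, hm, hfold⟩ := ih a (n + 1) (by omega)
        refine ⟨m, hm, ?_⟩
        rw [List.foldl_cons, hstep, hfold, List.filter_cons]
        simp [hx]
      · have hstep : pvStepA (s, a, n) x = (s, a ++ [x], n) := by
          simp [pvStepA, hx, (show (n : Int) ≠ 0 by omega)]
        obtain ⟨m, hm, hfold⟩ := ih (a ++ [x]) n hn
        refine ⟨m, hm, ?_⟩
        rw [List.foldl_cons, hstep, hfold, List.filter_cons]
        simp [hx]

theorem pvJoin_nil : PySem.Str.join " " ([] : List String) = "" := by decide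

theorem pvMain (L : List String) :
    ((PySem.Str.join " " (L.foldl pvStepA ([], [], 0)).1,
      PySem.Str.join " " (L.foldl pvStepA ([], [], 0)).2.1) : String × String) =
    (match PySem.List.index? L "" with
     | some i =>
        (PySem.Str.join " " (PySem.List.slice L none (some (i : Int))),
         PySem.Str.join " " ((PySem.List.slice L (some (i : Int)) none).filter
           (fun t => PySem.Str.len t != 0)))
     | none => (PySem.Str.join " " L, "")) := by
  cases hidx : PySem.List.index? L "" with
  | none =>
      have hmem : "" ∉ L := (PySem.List.index?_eq_none_iff L "").mp hidx
      rw [pvFoldA_zero L [] [] hmem]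
      simp [pvJoin_nil]
  | some i =>
      obtain ⟨pre, suf, hL, hlen, hpre⟩ := (PySem.List.index?_eq_some_iff L "" i).mp hidx
      subst hL
      have h1 : (pre ++ "" :: suf).foldl pvStepA (([], [], 0) : List String × List String × Int)
          = ("" :: suf).foldl pvStepA (pre, [], 0) := by
        rw [List.foldl_append, pvFoldA_zero pre [] [] hpre]
        simp
      have hstep : pvStepA ((pre, [], 0) : List String × List String × Int) "" = (pre, [], 1) := by
        simp [pvStepA, PySem.Str.len_eq]
      obtain ⟨m, hm, hfold⟩ := pvFoldA_pos suf pre [] 1 (by omega)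
      have h2 : ("" :: suf).foldl pvStepA ((pre, [], 0) : List String × List String × Int)
          = (pre, suf.filter (fun t => PySem.Str.len t != 0), m) := by
        rw [List.foldl_cons, hstep, hfold]
        simp
      have hslice1 : PySem.List.slice (pre ++ "" :: suf) none (some (i : Int)) = pre := by
        rw [PySem.List.slice_to_natCast]
        subst hlen
        exact List.take_left
      have hslice2 : PySem.List.slice (pre ++ "" :: suf) (some (i : Int)) none = "" :: suf := by
        rw [PySem.List.slice_from_natCast]
        subst hlen
        exact List.drop_left
      have hfilt : ("" :: suf).filter (fun t => PySem.Str.len t != 0)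
          = suf.filter (fun t => PySem.Str.len t != 0) := by
        rw [List.filter_cons]
        simp
      rw [h1, h2]
      simp only [hslice1, hslice2, hfilt]

-- ===== VERDICT (by name: the statement is the Claim_ definition above) =====
theorem get_song_artist_spec : Claim_equal_get_song_artist := by
  intro s _
  unfold Spec_get_song_artist get_song_artist get_song_artist_alt
  exact pvMain ((PySem.Str.split? s " ").getD [])
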